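-- pv_equiv track=rewrite | github.com/josefM928/PyGame | my_functions.py | two_vertical_lines
-- ===== SOURCE A (Python) =====
-- def two_vertical_lines(width,height,ch):
--     pattern=""
--     for i in range(height):
--         pattern += ch
--         for j in range(width-2):
--             pattern += " "
--         pattern += ch+"\n"
--
--     return pattern
-- ===== SOURCE B (Python) =====
-- def two_vertical_lines(width, height, ch):
--     if height <= 0:
--         return ""
--     row = ch + " " * (width - 2) + ch + "\n"
--     return row * height
-- ===== Notes on version B (the rewrite author's own statement) =====
-- stated objective: simpler
-- what changed: Replaces the nested per-character accumulation loops with a closed-form construction: one row built by string repetition, then repeated height times.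
import Mathlib
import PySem

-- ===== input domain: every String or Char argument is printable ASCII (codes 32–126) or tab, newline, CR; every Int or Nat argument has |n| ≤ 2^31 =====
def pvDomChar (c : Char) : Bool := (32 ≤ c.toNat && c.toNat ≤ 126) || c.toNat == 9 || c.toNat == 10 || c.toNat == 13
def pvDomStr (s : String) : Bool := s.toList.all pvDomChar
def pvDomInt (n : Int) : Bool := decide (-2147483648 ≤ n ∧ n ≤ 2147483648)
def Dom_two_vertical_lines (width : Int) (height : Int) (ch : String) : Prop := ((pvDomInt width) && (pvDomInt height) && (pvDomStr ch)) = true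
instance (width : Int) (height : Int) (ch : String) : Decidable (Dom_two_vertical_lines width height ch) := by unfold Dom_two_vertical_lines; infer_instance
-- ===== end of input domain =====

-- B replaces the nested per-character loops with a closed-form row built once and repeated height times (objective: simpler).


-- ===== PORT A =====
-- for i in range(height): pattern += ch; for j in range(width-2): pattern += " "; pattern += ch+"\n"
def two_vertical_lines (width : Int) (height : Int) (ch : String) : String :=
  String.ofList <|
    (PySem.List.pyRange 0 height 1).foldl
      (fun pattern _ =>
        ((PySem.List.pyRange 0 (width - 2) 1).foldl
          (fun p _ => p ++ [' '])
          (pattern ++ ch.toList)) ++ ch.toList ++ ['\n'])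
      []

-- ===== PORT B =====
-- if height <= 0: return ""; row = ch + " "*(width-2) + ch + "\n"; return row * height
def two_vertical_lines_alt (width : Int) (height : Int) (ch : String) : String :=
  if height ≤ 0 then ""
  else
    let row : List Char := ch.toList ++ List.replicate (width - 2).toNat ' ' ++ ch.toList ++ ['\n']
    String.ofList (List.replicate height.toNat row).flatten

-- ===== PRECONDITION & SPEC =====
def Spec_two_vertical_lines (width : Int) (height : Int) (ch : String) (out : String) : Prop := out = two_vertical_lines_alt width height ch
instance (width : Int) (height : Int) (ch : String) (out : String) : Decidable (Spec_two_vertical_lines width height ch out) := by unfold Spec_two_vertical_lines; infer_instance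

-- ===== CLAIM (what is proved, stated in full; the proofs are below) =====
def Claim_equal_two_vertical_lines : Prop := ∀ (width : Int) (height : Int) (ch : String), Dom_two_vertical_lines width height ch → Spec_two_vertical_lines width height ch (two_vertical_lines width height ch)

-- ===== LEMMAS AND PROOFS =====

-- folding "append a blank" over any list appends one blank per element
theorem foldl_blank {α : Type} (l : List α) (s : List Char) :
    l.foldl (fun p _ => p ++ [' ']) s = s ++ List.replicate l.length ' ' := by
  induction l generalizing s with
  | nil => simp
  | cons x xs ih =>
      simp only [List.foldl_cons, ih, List.length_cons, List.replicate_succ]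
      simp

-- folding "append row" over any list appends one row per element
theorem foldl_row {α : Type} (l : List α) (row : List Char) (s : List Char) :
    l.foldl (fun p _ => p ++ row) s = s ++ (List.replicate l.length row).flatten := by
  induction l generalizing s with
  | nil => simp
  | cons x xs ih =>
      rw [List.foldl_cons, ih, List.length_cons, List.replicate_succ, List.flatten_cons,
        List.append_assoc]

-- ===== VERDICT (by name: the statement is the Claim_ definition above) =====
theorem two_vertical_lines_spec : Claim_equal_two_vertical_lines := by
  intro width height ch _
  unfold Spec_two_vertical_lines two_vertical_lines two_vertical_lines_alt
  have hstep : ∀ (pattern : List Char),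
      ((PySem.List.pyRange 0 (width - 2) 1).foldl (fun p _ => p ++ [' '])
        (pattern ++ ch.toList)) ++ ch.toList ++ ['\n']
      = pattern ++ (ch.toList ++ List.replicate (width - 2).toNat ' ' ++ ch.toList ++ ['\n']) := by
    intro pattern
    rw [foldl_blank, PySem.List.length_pyRange_one]
    simp
  have hfold :
      (PySem.List.pyRange 0 height 1).foldl
        (fun pattern _ =>
          ((PySem.List.pyRange 0 (width - 2) 1).foldl (fun p _ => p ++ [' '])
            (pattern ++ ch.toList)) ++ ch.toList ++ ['\n']) []
      = (PySem.List.pyRange 0 height 1).foldl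
          (fun pattern _ =>
            pattern ++ (ch.toList ++ List.replicate (width - 2).toNat ' ' ++ ch.toList ++ ['\n'])) [] := by
    have hfun : (fun (pattern : List Char) (_ : Int) =>
        ((PySem.List.pyRange 0 (width - 2) 1).foldl (fun p _ => p ++ [' '])
          (pattern ++ ch.toList)) ++ ch.toList ++ ['\n'])
        = (fun (pattern : List Char) (_ : Int) =>
            pattern ++ (ch.toList ++ List.replicate (width - 2).toNat ' ' ++ ch.toList ++ ['\n'])) := by
      funext p x
      exact hstep p
    rw [hfun]
  rw [hfold, foldl_row, PySem.List.length_pyRange_one]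
  by_cases hh : height ≤ 0
  · have h0 : (height - 0).toNat = 0 := by omega
    rw [if_pos hh, h0]
    rfl
  · rw [if_neg hh]
    have h0 : height - 0 = height := by omega
    rw [h0]
    simp
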